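-- pv_equiv track=rewrite | github.com/Sur818/Coding-Projects | python programming/longestdistbw 0 and 1.py | longest_distance
-- ===== SOURCE A (Python) =====
-- def longest_distance(l):
-- 	i=0
-- 	distance=0
-- 	for i in range(len(l)):
-- 		for j in range(i+1,len(l)):
-- 			if l[i]=='1'and l[j]=='0':
-- 				distance=max(distance,j-i)
-- 	return distance-1
-- ===== SOURCE B (Python) =====
-- def longest_distance(l):
--     first_one = -1
--     last_zero = -1
--     for i in range(len(l)):
--         if first_one < 0 and l[i] == '1':
--             first_one = i
--         if l[i] == '0':
--             last_zero = i
--     if 0 <= first_one < last_zero: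
--         return last_zero - first_one - 1
--     return -1
-- ===== Notes on version B (the rewrite author's own statement) =====
-- stated objective: faster
-- what changed: Replaced the quadratic scan over all (i,j) pairs by a single pass recording the first index of '1' and the last index of '0'; the answer is lastZero-firstOne-1 when that pair exists, else -1.
import Mathlib
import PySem

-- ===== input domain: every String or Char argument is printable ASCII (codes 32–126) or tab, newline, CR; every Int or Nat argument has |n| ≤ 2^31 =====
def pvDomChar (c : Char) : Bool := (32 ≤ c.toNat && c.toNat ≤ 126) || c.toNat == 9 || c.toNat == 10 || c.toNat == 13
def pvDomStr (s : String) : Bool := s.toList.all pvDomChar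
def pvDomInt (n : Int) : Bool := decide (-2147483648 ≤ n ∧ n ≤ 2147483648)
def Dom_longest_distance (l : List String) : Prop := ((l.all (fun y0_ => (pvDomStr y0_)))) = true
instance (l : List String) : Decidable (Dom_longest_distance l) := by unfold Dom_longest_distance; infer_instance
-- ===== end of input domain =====

-- B replaces A's quadratic scan over all index pairs by one linear pass that records
-- the first index of '1' and the last index of '0' (objective: faster, O(n) vs O(n^2)).

-- ===== PORT A =====
def longest_distance (l : List String) : Int :=
  let distance : Int :=
    (PySem.List.pyRange 0 (l.length : Int) 1).foldl (fun distance i =>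
      (PySem.List.pyRange (i + 1) (l.length : Int) 1).foldl (fun distance j =>
        if PySem.List.pyGetD l i "" = "1" ∧ PySem.List.pyGetD l j "" = "0" then
          max distance (j - i)
        else distance) distance) 0
  distance - 1

-- ===== PORT B =====
def longest_distance_alt (l : List String) : Int :=
  let st : Int × Int :=
    (PySem.List.pyRange 0 (l.length : Int) 1).foldl (fun (p : Int × Int) i =>
      (if p.1 < 0 ∧ PySem.List.pyGetD l i "" = "1" then i else p.1,
       if PySem.List.pyGetD l i "" = "0" then i else p.2)) (-1, -1)
  if 0 ≤ st.1 ∧ st.1 < st.2 then st.2 - st.1 - 1 else -1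

-- ===== PRECONDITION & SPEC =====
def Spec_longest_distance (l : List String) (out : Int) : Prop := out = longest_distance_alt l
instance (l : List String) (out : Int) : Decidable (Spec_longest_distance l out) := by unfold Spec_longest_distance; infer_instance

-- ===== CLAIM (what is proved, stated in full; the proofs are below) =====
def Claim_equal_longest_distance : Prop := ∀ (l : List String), Dom_longest_distance l → Spec_longest_distance l (longest_distance l)

-- ===== LEMMAS AND PROOFS =====

-- last index z in [a, len l) with l[z] = "0", as a left fold (none if there is none)
def lzF (l : List String) (a : Int) : Option Int :=
  (PySem.List.pyRange a (l.length : Int) 1).foldl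
    (fun acc j => if PySem.List.pyGetD l j "" = "0" then some j else acc) none

-- first index f in [a, len l) with l[f] = "1", as a left fold
def foF (l : List String) (a : Int) : Option Int :=
  (PySem.List.pyRange a (l.length : Int) 1).foldl
    (fun acc j => if acc = none ∧ PySem.List.pyGetD l j "" = "1" then some j else acc) none

-- the last-zero fold from any accumulator: a later zero overrides, otherwise the accumulator survives
theorem lz_absorb (l : List String) : ∀ (k : Nat) (a : Int) (acc : Option Int),
    ((l.length : Int) - a).toNat = k →
    (PySem.List.pyRange a (l.length : Int) 1).foldl
      (fun acc j => if PySem.List.pyGetD l j "" = "0" then some j else acc) acc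
    = (match lzF l a with | some z => some z | none => acc) := by
  intro k
  induction k with
  | zero =>
    intro a acc hk
    have hle : (l.length : Int) ≤ a := by omega
    unfold lzF
    rw [PySem.List.pyRange_one_eq_nil hle]
    simp
  | succ k ih =>
    intro a acc hk
    have hlt : a < (l.length : Int) := by omega
    have hcons := PySem.List.pyRange_one_cons hlt (b := (l.length : Int))
    unfold lzF
    rw [hcons]
    simp only [List.foldl_cons]
    have h1 := ih (a + 1) (if PySem.List.pyGetD l a "" = "0" then some a else acc) (by omega)
    have h2 := ih (a + 1) (if PySem.List.pyGetD l a "" = "0" then some a else none) (by omega)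
    rw [h1, h2]
    cases hz : lzF l (a + 1) with
    | some z => simp [hz]
    | none => by_cases h0 : PySem.List.pyGetD l a "" = "0" <;> simp [hz, h0]

theorem lz_step (l : List String) {a : Int} (h : a < (l.length : Int)) :
    lzF l a = (match lzF l (a + 1) with
      | some z => some z
      | none => if PySem.List.pyGetD l a "" = "0" then some a else none) := by
  conv_lhs => unfold lzF
  rw [PySem.List.pyRange_one_cons h]
  simp only [List.foldl_cons]
  exact lz_absorb l ((l.length : Int) - (a + 1)).toNat (a + 1)
    (if PySem.List.pyGetD l a "" = "0" then some a else none) rfl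

theorem lz_bound (l : List String) : ∀ (k : Nat) (a z : Int),
    ((l.length : Int) - a).toNat = k → lzF l a = some z →
    a ≤ z ∧ z < (l.length : Int) ∧ PySem.List.pyGetD l z "" = "0" := by
  intro k
  induction k with
  | zero =>
    intro a z hk hz
    have hle : (l.length : Int) ≤ a := by omega
    unfold lzF at hz
    rw [PySem.List.pyRange_one_eq_nil hle] at hz
    simp at hz
  | succ k ih =>
    intro a z hk hz
    have hlt : a < (l.length : Int) := by omega
    rw [lz_step l hlt] at hz
    cases h1 : lzF l (a + 1) with
    | some w =>
      rw [h1] at hz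
      injection hz with hz
      subst hz
      have := ih (a + 1) w (by omega) h1
      exact ⟨by omega, this.2⟩
    | none =>
      rw [h1] at hz
      by_cases h0 : PySem.List.pyGetD l a "" = "0"
      · simp [h0] at hz
        subst hz
        exact ⟨le_refl a, hlt, h0⟩
      · simp [h0] at hz

theorem lz_mono (l : List String) {a a' z : Int} (hle : a ≤ a') (hn : a' ≤ (l.length : Int))
    (h : lzF l a' = some z) : lzF l a = some z := by
  unfold lzF
  rw [PySem.List.pyRange_one_append a a' (l.length : Int) hle hn, List.foldl_append]
  have := lz_absorb l ((l.length : Int) - a').toNat a'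
    ((PySem.List.pyRange a a' 1).foldl
      (fun acc j => if PySem.List.pyGetD l j "" = "0" then some j else acc) none) rfl
  rw [this, h]

theorem lz_isSome (l : List String) : ∀ (k : Nat) (a z : Int),
    (z - a).toNat = k → a ≤ z → z < (l.length : Int) → PySem.List.pyGetD l z "" = "0" →
    ∃ w, lzF l a = some w := by
  intro k
  induction k with
  | zero =>
    intro a z hk haz hz h0
    have : a = z := by omega
    subst this
    rw [lz_step l hz]
    cases h1 : lzF l (a + 1) with
    | some w => exact ⟨w, rfl⟩
    | none => exact ⟨a, by simp [h0]⟩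
  | succ k ih =>
    intro a z hk haz hz h0
    have hlt : a < z := by omega
    obtain ⟨w, hw⟩ := ih (a + 1) z (by omega) (by omega) hz h0
    rw [lz_step l (by omega)]
    rw [hw]
    exact ⟨w, rfl⟩

theorem fo_const (l : List String) (xs : List Int) (f : Int) :
    xs.foldl (fun acc j => if acc = none ∧ PySem.List.pyGetD l j "" = "1" then some j else acc)
      (some f) = some f := by
  induction xs with
  | nil => rfl
  | cons x xs ih => simpa using ih

theorem fo_step (l : List String) {a : Int} (h : a < (l.length : Int)) :
    foF l a = if PySem.List.pyGetD l a "" = "1" then some a else foF l (a + 1) := by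
  unfold foF
  rw [PySem.List.pyRange_one_cons h]
  simp only [List.foldl_cons]
  by_cases h1 : PySem.List.pyGetD l a "" = "1"
  · simp [h1, fo_const]
  · simp [h1]

theorem fo_bound (l : List String) : ∀ (k : Nat) (a f : Int),
    ((l.length : Int) - a).toNat = k → foF l a = some f →
    a ≤ f ∧ f < (l.length : Int) := by
  intro k
  induction k with
  | zero =>
    intro a f hk hf
    have hle : (l.length : Int) ≤ a := by omega
    unfold foF at hf
    rw [PySem.List.pyRange_one_eq_nil hle] at hf
    simp at hf
  | succ k ih =>
    intro a f hk hf
    have hlt : a < (l.length : Int) := by omega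
    rw [fo_step l hlt] at hf
    by_cases h1 : PySem.List.pyGetD l a "" = "1"
    · simp [h1] at hf
      subst hf
      exact ⟨le_refl a, hlt⟩
    · simp [h1] at hf
      have := ih (a + 1) f (by omega) hf
      exact ⟨by omega, this.2⟩

-- inner loop of A when l[i] = "1": it computes max d (z - i) for the last zero z in [a, n)
theorem inner_char (l : List String) (i : Int) (hget : PySem.List.pyGetD l i "" = "1") :
    ∀ (k : Nat) (a : Int) (d : Int), ((l.length : Int) - a).toNat = k →
    (PySem.List.pyRange a (l.length : Int) 1).foldl (fun distance j =>
        if PySem.List.pyGetD l i "" = "1" ∧ PySem.List.pyGetD l j "" = "0" then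
          max distance (j - i)
        else distance) d
    = (match lzF l a with | none => d | some z => max d (z - i)) := by
  intro k
  induction k with
  | zero =>
    intro a d hk
    have hle : (l.length : Int) ≤ a := by omega
    unfold lzF
    rw [PySem.List.pyRange_one_eq_nil hle]
    simp
  | succ k ih =>
    intro a d hk
    have hlt : a < (l.length : Int) := by omega
    rw [PySem.List.pyRange_one_cons hlt]
    simp only [List.foldl_cons]
    rw [ih (a + 1) _ (by omega)]
    rw [lz_step l hlt]
    by_cases h0 : PySem.List.pyGetD l a "" = "0"
    · cases hz : lzF l (a + 1) with
      | none => simp [hz, hget, h0]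
      | some z =>
        have hb := lz_bound l ((l.length : Int) - (a + 1)).toNat (a + 1) z rfl hz
        simp only [hz, hget, h0, and_self, if_true]
        rw [max_assoc]
        congr 1
        exact max_eq_right (by omega)
    · cases hz : lzF l (a + 1) with
      | none => simp [hz, hget, h0]
      | some z => simp [hz, hget, h0]

-- inner loop of A when l[i] ≠ "1": it leaves the accumulator unchanged
theorem inner_id (l : List String) (i : Int) (hget : ¬ PySem.List.pyGetD l i "" = "1")
    (xs : List Int) (d : Int) :
    xs.foldl (fun distance j =>
        if PySem.List.pyGetD l i "" = "1" ∧ PySem.List.pyGetD l j "" = "0" then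
          max distance (j - i)
        else distance) d = d := by
  induction xs generalizing d with
  | nil => rfl
  | cons x xs ih => simp [hget, ih]

-- A's nested loops compute max d (z - f) for the first one f and the last zero z after it
theorem outer_char (l : List String) : ∀ (k : Nat) (a d : Int),
    ((l.length : Int) - a).toNat = k →
    (PySem.List.pyRange a (l.length : Int) 1).foldl (fun distance i =>
      (PySem.List.pyRange (i + 1) (l.length : Int) 1).foldl (fun distance j =>
        if PySem.List.pyGetD l i "" = "1" ∧ PySem.List.pyGetD l j "" = "0" then
          max distance (j - i)
        else distance) distance) d
    = (match foF l a with
       | none => d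
       | some f => match lzF l (f + 1) with
         | none => d
         | some z => max d (z - f)) := by
  intro k
  induction k with
  | zero =>
    intro a d hk
    have hle : (l.length : Int) ≤ a := by omega
    unfold foF
    rw [PySem.List.pyRange_one_eq_nil hle]
    simp
  | succ k ih =>
    intro a d hk
    have hlt : a < (l.length : Int) := by omega
    rw [PySem.List.pyRange_one_cons hlt]
    simp only [List.foldl_cons]
    by_cases h1 : PySem.List.pyGetD l a "" = "1"
    · rw [inner_char l a h1 ((l.length : Int) - (a + 1)).toNat (a + 1) d (by omega)]
      rw [fo_step l hlt, if_pos h1]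
      cases hz : lzF l (a + 1) with
      | none =>
        rw [ih (a + 1) d (by omega)]
        cases hf : foF l (a + 1) with
        | none => simp [hz]
        | some f' =>
          have hb := fo_bound l ((l.length : Int) - (a + 1)).toNat (a + 1) f' rfl hf
          cases hz' : lzF l (f' + 1) with
          | none => simp [hz', hz]
          | some z' =>
            have := lz_mono l (a := a + 1) (a' := f' + 1) (by omega) (by omega) hz'
            rw [this] at hz
            exact absurd hz (by simp)
      | some z =>
        rw [ih (a + 1) (max d (z - a)) (by omega)]
        have hzb := lz_bound l ((l.length : Int) - (a + 1)).toNat (a + 1) z rfl hz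
        cases hf : foF l (a + 1) with
        | none => simp [hz]
        | some f' =>
          have hb := fo_bound l ((l.length : Int) - (a + 1)).toNat (a + 1) f' rfl hf
          cases hz' : lzF l (f' + 1) with
          | none => simp [hz', hz]
          | some z' =>
            have hm := lz_mono l (a := a + 1) (a' := f' + 1) (by omega) (by omega) hz'
            have hzz : z' = z := by rw [hm] at hz; injection hz
            subst hzz
            simp only [hz', hm]
            rw [max_assoc]
            congr 1
            exact max_eq_left (by omega)
    · rw [inner_id l a h1]
      rw [fo_step l hlt, if_neg h1]
      exact ih (a + 1) d (by omega)

-- B's single pass computes the first one (sentinel -1) and the last zero (sentinel -1)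
theorem alt_char (l : List String) : ∀ (k : Nat) (a : Int) (p : Int × Int),
    0 ≤ a → ((l.length : Int) - a).toNat = k →
    (PySem.List.pyRange a (l.length : Int) 1).foldl (fun (p : Int × Int) i =>
      (if p.1 < 0 ∧ PySem.List.pyGetD l i "" = "1" then i else p.1,
       if PySem.List.pyGetD l i "" = "0" then i else p.2)) p
    = ((if p.1 < 0 then (foF l a).getD p.1 else p.1), (lzF l a).getD p.2) := by
  intro k
  induction k with
  | zero =>
    intro a p ha hk
    have hle : (l.length : Int) ≤ a := by omega
    unfold foF lzF
    rw [PySem.List.pyRange_one_eq_nil hle]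
    simp
  | succ k ih =>
    intro a p ha hk
    have hlt : a < (l.length : Int) := by omega
    rw [PySem.List.pyRange_one_cons hlt]
    simp only [List.foldl_cons]
    rw [ih (a + 1) _ (by omega) (by omega)]
    rw [fo_step l hlt, lz_step l hlt]
    rw [Prod.ext_iff]
    refine ⟨?_, ?_⟩
    · -- first component
      by_cases hp : p.1 < 0
      · by_cases h1 : PySem.List.pyGetD l a "" = "1"
        · simp [hp, h1, show ¬ (a < 0) by omega]
        · simp [hp, h1]
      · simp [hp]
    · -- second component
      cases hz : lzF l (a + 1) with
      | some z => simp [hz]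
      | none =>
        by_cases h0 : PySem.List.pyGetD l a "" = "0"
        · simp [hz, h0]
        · simp [hz, h0]

-- ===== VERDICT (by name: the statement is the Claim_ definition above) =====
theorem longest_distance_spec : Claim_equal_longest_distance := by
  unfold Claim_equal_longest_distance
  intro l _
  unfold Spec_longest_distance longest_distance longest_distance_alt
  simp only []
  rw [outer_char l ((l.length : Int) - 0).toNat 0 0 rfl]
  rw [alt_char l ((l.length : Int) - 0).toNat 0 (-1, -1) le_rfl rfl]
  cases hf : foF l 0 with
  | none => simp
  | some f =>
    have hfb := fo_bound l ((l.length : Int) - 0).toNat 0 f rfl hf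
    cases hz : lzF l (f + 1) with
    | some z =>
      have hzb := lz_bound l ((l.length : Int) - (f + 1)).toNat (f + 1) z rfl hz
      have hz0 : lzF l 0 = some z := lz_mono l (by omega) (by omega) hz
      simp only [hz, hz0]
      have hcond : (0 : Int) ≤ f ∧ f < z := ⟨by omega, by omega⟩
      simp [hcond]
      omega
    | none =>
      cases hz0 : lzF l 0 with
      | none =>
        simp [hz, show ¬ (f < (-1 : Int)) by omega]
      | some z =>
        have hzb := lz_bound l ((l.length : Int) - 0).toNat 0 z rfl hz0
        have hnlt : ¬ f < z := by
          intro hlt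
          obtain ⟨w, hw⟩ := lz_isSome l (z - (f + 1)).toNat (f + 1) z rfl (by omega) hzb.2.1 hzb.2.2
          rw [hw] at hz
          exact absurd hz (by simp)
        simp [hz, hnlt]
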